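-- pv_equiv track=rewrite | github.com/Juli-AI-Eng/Juli-Calendar | tests/e2e/utils/http_logger.py | _mask_credentials
-- ===== SOURCE A (Python) =====
-- from typing import Dict, Any, Optional
--
-- def _mask_credentials(headers: Dict[str, str]) -> Dict[str, str]:
--     """Mask sensitive credential headers."""
--     masked = headers.copy()
--     credential_keys = [
--         "X-User-Credential-RECLAIM-API-KEY",
--         "X-User-Credential-NYLAS-API-KEY",
--         "X-User-Credential-NYLAS-GRANT-ID",
--         "x-user-credential-reclaim-api-key",
--         "x-user-credential-nylas-api-key",
--         "x-user-credential-nylas-grant-id"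
--     ]
--
--     for key in credential_keys:
--         if key in masked:
--             masked[key] = "***"
--
--     return masked
-- ===== SOURCE B (Python) =====
-- _CREDENTIAL_KEYS = frozenset({
--     "X-User-Credential-RECLAIM-API-KEY",
--     "X-User-Credential-NYLAS-API-KEY",
--     "X-User-Credential-NYLAS-GRANT-ID",
--     "x-user-credential-reclaim-api-key",
--     "x-user-credential-nylas-api-key",
--     "x-user-credential-nylas-grant-id",
-- })
--
-- def _mask_credentials(headers):
--     """Mask sensitive credential headers."""
--     return {k: ("***" if k in _CREDENTIAL_KEYS else v) for k, v in headers.items()}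
-- ===== Notes on version B (the rewrite author's own statement) =====
-- stated objective: idiomatic
-- what changed: Instead of copying the dict and probing/overwriting it once per fixed credential key, B makes a single pass over the headers with a dict comprehension, masking each value whose key lies in a frozenset of credential keys.
import Mathlib
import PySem

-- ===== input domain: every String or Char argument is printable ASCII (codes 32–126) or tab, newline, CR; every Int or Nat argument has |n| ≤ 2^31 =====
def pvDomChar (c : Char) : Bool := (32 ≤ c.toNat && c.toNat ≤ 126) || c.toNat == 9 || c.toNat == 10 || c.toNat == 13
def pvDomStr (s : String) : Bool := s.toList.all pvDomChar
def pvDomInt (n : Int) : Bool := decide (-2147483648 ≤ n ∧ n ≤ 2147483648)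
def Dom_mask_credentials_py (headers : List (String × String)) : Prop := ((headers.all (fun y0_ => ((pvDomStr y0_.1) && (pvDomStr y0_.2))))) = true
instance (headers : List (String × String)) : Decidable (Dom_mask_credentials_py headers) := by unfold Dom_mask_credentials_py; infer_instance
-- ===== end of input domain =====

-- B replaces A's copy-then-probe-six-fixed-keys loop by one pass over the headers
-- masking against a set of credential keys (idiomatic; same cost).

-- ===== PORT A =====
def mask_credentials_py (headers : List (String × String)) : List (String × String) :=
  -- masked = headers.copy()
  let masked : PySem.Dict String String := PySem.Dict.mk headers
  let credential_keys : List String :=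
    [ "X-User-Credential-RECLAIM-API-KEY",
      "X-User-Credential-NYLAS-API-KEY",
      "X-User-Credential-NYLAS-GRANT-ID",
      "x-user-credential-reclaim-api-key",
      "x-user-credential-nylas-api-key",
      "x-user-credential-nylas-grant-id" ]
  -- for key in credential_keys: if key in masked: masked[key] = "***"
  let masked := credential_keys.foldl
    (fun m key => if m.contains key then m.insert key "***" else m) masked
  masked.items

-- ===== PORT B =====
def credentialKeySet : PySem.Set String :=
  PySem.Set.ofList
    [ "X-User-Credential-RECLAIM-API-KEY",
      "X-User-Credential-NYLAS-API-KEY",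
      "X-User-Credential-NYLAS-GRANT-ID",
      "x-user-credential-reclaim-api-key",
      "x-user-credential-nylas-api-key",
      "x-user-credential-nylas-grant-id" ]

def mask_credentials_py_alt (headers : List (String × String)) : List (String × String) :=
  headers.map (fun p => (p.1, if PySem.Set.contains credentialKeySet p.1 then "***" else p.2))

-- ===== PRECONDITION & SPEC =====
def Spec_mask_credentials_py (headers : List (String × String)) (out : List (String × String)) : Prop := out = mask_credentials_py_alt headers
instance (headers : List (String × String)) (out : List (String × String)) : Decidable (Spec_mask_credentials_py headers out) := by unfold Spec_mask_credentials_py; infer_instance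

-- ===== CLAIM (what is proved, stated in full; the proofs are below) =====
def Claim_equal_mask_credentials_py : Prop := ∀ (headers : List (String × String)), Dom_mask_credentials_py headers → Spec_mask_credentials_py headers (mask_credentials_py headers)

-- ===== LEMMAS AND PROOFS =====

-- A's masking loop, over any key list, acts on the items as a pointwise map.
theorem maskA_items (ks : List String) (l : List (String × String)) :
    (ks.foldl (fun m key => if m.contains key then m.insert key "***" else m)
      (PySem.Dict.mk l)).items
    = l.map (fun p => if p.1 ∈ ks then (p.1, "***") else p) := by
  induction ks generalizing l with
  | nil =>
    simp
  | cons k ks ih =>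
    have hstep :
        (if (PySem.Dict.mk l).contains k then (PySem.Dict.mk l).insert k "***" else PySem.Dict.mk l)
        = PySem.Dict.mk (l.map (fun p => if p.1 == k then (k, "***") else p)) := by
      by_cases h : (PySem.Dict.mk l).contains k = true
      · apply PySem.Dict.ext
        simp only [h, if_true]
        rw [PySem.Dict.items_insert_of_contains]
        exact h
      · apply PySem.Dict.ext
        simp only [h]
        have hk : ∀ p ∈ l, (if p.1 == k then ((k, "***") : String × String) else p) = p := by
          intro p hp
          have : p.1 ≠ k := by
            intro hpk
            apply h
            have hm : k ∈ (PySem.Dict.mk l).keys := by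
              simp only [PySem.Dict.keys]
              exact List.mem_map.mpr ⟨p, hp, hpk⟩
            exact (PySem.Dict.contains_iff_mem_keys _ _).mpr hm
          simp [this]
        show l = l.map _
        rw [List.map_congr_left hk]
        simp
    rw [List.foldl_cons, hstep, ih, List.map_map]
    apply List.map_congr_left
    intro p _
    by_cases hpk : p.1 = k
    · simp [hpk]
    · simp [hpk, Function.comp]

-- ===== VERDICT (by name: the statement is the Claim_ definition above) =====
theorem mask_credentials_py_spec : Claim_equal_mask_credentials_py := by
  intro headers _
  unfold Spec_mask_credentials_py mask_credentials_py mask_credentials_py_alt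
  rw [maskA_items]
  apply List.map_congr_left
  intro p _
  by_cases h : p.1 ∈
      [ "X-User-Credential-RECLAIM-API-KEY",
        "X-User-Credential-NYLAS-API-KEY",
        "X-User-Credential-NYLAS-GRANT-ID",
        "x-user-credential-reclaim-api-key",
        "x-user-credential-nylas-api-key",
        "x-user-credential-nylas-grant-id" ]
  · have hc : PySem.Set.contains credentialKeySet p.1 = true := by
      rw [PySem.Set.contains_iff]
      exact (PySem.Set.mem_ofList _ _).mpr h
    rw [if_pos h, hc]
    simp
  · have hc : PySem.Set.contains credentialKeySet p.1 = false := by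
      rw [Bool.eq_false_iff]
      intro hcc
      exact h ((PySem.Set.mem_ofList _ _).mp ((PySem.Set.contains_iff _ _).mp hcc))
    rw [if_neg h, hc]
    simp
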